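-- pv_equiv track=rewrite | github.com/erimcakir123/polymarket-agent | src/tennis_tml.py | _parse_players_from_slug
-- ===== SOURCE A (Python) =====
-- from typing import Optional
--
-- def _parse_players_from_slug(slug: str) -> tuple[Optional[str], Optional[str]]:
--     """Extract player tokens from slug like 'atp-sinner-machac-2026-04-09'.
--
--     This is a WEAK fallback -- returns tokens that need fuzzy matching upstream.
--     """
--     if not slug:
--         return None, None
--     parts = slug.lower().split("-")
--     if len(parts) < 3:
--         return None, None
--     non_date: list[str] = []
--     for p in parts[1:]:  # skip sport prefix
--         if len(p) == 4 and p.isdigit():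
--             break
--         non_date.append(p)
--     if len(non_date) >= 2:
--         return non_date[0], non_date[1]
--     return None, None
-- ===== SOURCE B (Python) =====
-- from typing import Optional
--
--
-- def _is_year(p: str) -> bool:
--     return len(p) == 4 and p.isdigit()
--
--
-- def _parse_players_from_slug(slug: str) -> tuple[Optional[str], Optional[str]]:
--     """Extract player tokens from slug; no accumulator loop, direct indexing."""
--     if not slug:
--         return None, None
--     parts = slug.lower().split("-")
--     if len(parts) < 3:
--         return None, None
--     p1, p2 = parts[1], parts[2]
--     if _is_year(p1) or _is_year(p2):
--         return None, None
--     return p1, p2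
-- ===== Notes on version B (the rewrite author's own statement) =====
-- stated objective: simpler
-- what changed: Drops the accumulation loop over parts[1:]: B observes the loop yields two tokens exactly when neither parts[1] nor parts[2] is a 4-digit year, so it inspects only those two positions and returns them directly.
import Mathlib
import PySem

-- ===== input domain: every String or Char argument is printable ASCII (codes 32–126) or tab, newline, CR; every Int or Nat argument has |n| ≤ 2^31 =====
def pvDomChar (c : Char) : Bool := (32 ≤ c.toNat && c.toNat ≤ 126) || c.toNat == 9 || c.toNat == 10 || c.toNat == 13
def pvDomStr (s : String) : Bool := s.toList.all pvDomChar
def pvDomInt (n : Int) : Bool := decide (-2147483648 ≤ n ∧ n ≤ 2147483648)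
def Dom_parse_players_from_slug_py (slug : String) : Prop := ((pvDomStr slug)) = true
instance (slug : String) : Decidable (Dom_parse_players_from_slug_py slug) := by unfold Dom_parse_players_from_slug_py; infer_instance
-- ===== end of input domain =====

-- B replaces A's accumulation loop over parts[1:] by a direct check of parts[1]/parts[2] (simpler).

-- ===== PORT A =====
-- the 'for p in parts[1:]' loop with break: structural recursion over the remaining parts, same accumulator
def pvLoopA : List String → List String → List String
  | [], non_date => non_date
  | p :: rest, non_date =>
      if PySem.Str.len p == 4 && PySem.Str.strIsdigit p then non_date
      else pvLoopA rest (non_date ++ [p])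

def parse_players_from_slug_py (slug : String) : Option String × Option String :=
  if slug == "" then (none, none)
  else
    let parts := (PySem.Str.split? (PySem.Str.lower slug) "-").getD []
    if parts.length < 3 then (none, none)
    else
      let non_date := pvLoopA (PySem.List.slice parts (some 1) none) []
      if 2 ≤ non_date.length then
        (PySem.List.pyGet? non_date 0, PySem.List.pyGet? non_date 1)
      else (none, none)

-- ===== PORT B =====
def pvIsYear (p : String) : Bool := PySem.Str.len p == 4 && PySem.Str.strIsdigit p

def parse_players_from_slug_py_alt (slug : String) : Option String × Option String :=
  if slug == "" then (none, none)
  else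
    let parts := (PySem.Str.split? (PySem.Str.lower slug) "-").getD []
    if parts.length < 3 then (none, none)
    else
      let p1 := PySem.List.pyGetD parts 1 ""
      let p2 := PySem.List.pyGetD parts 2 ""
      if pvIsYear p1 || pvIsYear p2 then (none, none)
      else (some p1, some p2)

-- ===== PRECONDITION & SPEC =====
def Spec_parse_players_from_slug_py (slug : String) (out : Option String × Option String) : Prop := out = parse_players_from_slug_py_alt slug
instance (slug : String) (out : Option String × Option String) : Decidable (Spec_parse_players_from_slug_py slug out) := by unfold Spec_parse_players_from_slug_py; infer_instance

-- ===== CLAIM (what is proved, stated in full; the proofs are below) =====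
def Claim_equal_parse_players_from_slug_py : Prop := ∀ (slug : String), Dom_parse_players_from_slug_py slug → Spec_parse_players_from_slug_py slug (parse_players_from_slug_py slug)

-- ===== LEMMAS AND PROOFS =====
theorem pvGet0 (a b : String) (l : List String) : PySem.List.pyGet? (a :: b :: l) 0 = some a := by
  have h : ((0 : Int)) = ((0 : Nat) : Int) := by norm_num
  rw [h, PySem.List.pyGet?_natCast]; simp

theorem pvGet1 (a b : String) (l : List String) : PySem.List.pyGet? (a :: b :: l) 1 = some b := by
  have h : ((1 : Int)) = ((1 : Nat) : Int) := by norm_num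
  rw [h, PySem.List.pyGet?_natCast]; simp

theorem pvGetD1 (a b c : String) (l : List String) : PySem.List.pyGetD (a :: b :: c :: l) 1 "" = b := by
  have h : ((1 : Int)) = ((1 : Nat) : Int) := by norm_num
  rw [h, PySem.List.pyGetD_natCast]; simp

theorem pvGetD2 (a b c : String) (l : List String) : PySem.List.pyGetD (a :: b :: c :: l) 2 "" = c := by
  have h : ((2 : Int)) = ((2 : Nat) : Int) := by norm_num
  rw [h, PySem.List.pyGetD_natCast]; simp

theorem pvLoopA_acc (l : List String) : ∀ acc, pvLoopA l acc = acc ++ pvLoopA l [] := by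
  induction l with
  | nil => intro acc; simp [pvLoopA]
  | cons p rest ih =>
      intro acc
      simp only [pvLoopA]
      split_ifs with h
      · simp
      · rw [ih (acc ++ [p]), ih ([] ++ [p])]
        simp

-- the loop's result on p1 :: p2 :: rest, by cases on the two year tests
theorem pvLoopA_char (p1 p2 : String) (rest : List String) :
    pvLoopA (p1 :: p2 :: rest) [] =
      if pvIsYear p1 then []
      else if pvIsYear p2 then [p1]
      else p1 :: p2 :: pvLoopA rest [] := by
  simp only [pvLoopA, pvIsYear]
  split_ifs with h1 h2
  · rfl
  · rfl
  · rw [pvLoopA_acc rest]; simp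

-- ===== VERDICT (by name: the statement is the Claim_ definition above) =====
theorem parse_players_from_slug_py_spec : Claim_equal_parse_players_from_slug_py := by
  intro slug _
  unfold Spec_parse_players_from_slug_py parse_players_from_slug_py parse_players_from_slug_py_alt
  by_cases he : (slug == "") = true
  · simp [he]
  · simp only [he, Bool.false_eq_true, if_false]
    generalize (PySem.Str.split? (PySem.Str.lower slug) "-").getD [] = parts
    by_cases hl : parts.length < 3
    · simp [hl]
    · simp only [hl, if_false]
      rcases parts with _ | ⟨p0, _ | ⟨p1, _ | ⟨p2, rest⟩⟩⟩
      · simp at hl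
      · simp at hl
      · simp at hl
      · rw [PySem.List.slice_from_one]
        simp only [List.tail_cons]
        rw [pvLoopA_char, pvGetD1, pvGetD2]
        by_cases h1 : pvIsYear p1 = true
        · simp [h1]
        · by_cases h2 : pvIsYear p2 = true
          · simp [h1, h2]
          · simp only [h1, h2, Bool.false_eq_true, if_false, Bool.or_self]
            rw [pvGet0, pvGet1]
            simp
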